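-- pv_equiv track=rewrite | github.com/walletkun/leetcode_practices | prefix_sum/common_prefix.py | solution
-- ===== SOURCE A (Python) =====
-- def solution(A : list[int], B: list[int]) -> list[int]:
--
--     # Intialize a set to store values we've seen
--     seen = set()
--
--     # Initialize a prefix array with length of A or B since they're the same I'll pick A
--     prefix = [0] * len(A)
--
--     # Initialize a counter varaible to keep track with whatever we've seen
--     count = 0
--
--     for i in range(len(A)):
--         if A[i] in seen:
--             count += 1
--
--         seen.add(A[i])
--
--         if B[i] in seen:
--             count += 1
--
--         seen.add(B[i])
--
--         prefix[i] = count
--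
--     return prefix
--
-- A = [1,3,2]
--
-- B = [2,1,3]
-- ===== SOURCE B (Python) =====
-- def solution(A: list[int], B: list[int]) -> list[int]:
--     # Staged pipeline instead of a single stateful pass: interleave the two
--     # arrays, map each value to its first-occurrence index, mark repeats,
--     # then prefix-sum the repeat mask and sample it after each pair.
--     C = [x for ab in zip(A, B) for x in ab]
--     first = {}
--     for j, v in enumerate(C):
--         first.setdefault(v, j)
--     dup = [0 if first[v] == j else 1 for j, v in enumerate(C)]
--     out = []
--     total = 0
--     for j, d in enumerate(dup):
--         total += d
--         if j % 2 == 1: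
--             out.append(total)
--     return out
-- ===== Notes on version B (the rewrite author's own statement) =====
-- stated objective: alternative
-- what changed: B replaces A's single stateful pass (seen-set with two membership branches and a running counter) by a staged pipeline: interleave the arrays, build a first-occurrence-index dict, derive a 0/1 repeat mask, then prefix-sum the mask sampling after each pair.
import Mathlib
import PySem

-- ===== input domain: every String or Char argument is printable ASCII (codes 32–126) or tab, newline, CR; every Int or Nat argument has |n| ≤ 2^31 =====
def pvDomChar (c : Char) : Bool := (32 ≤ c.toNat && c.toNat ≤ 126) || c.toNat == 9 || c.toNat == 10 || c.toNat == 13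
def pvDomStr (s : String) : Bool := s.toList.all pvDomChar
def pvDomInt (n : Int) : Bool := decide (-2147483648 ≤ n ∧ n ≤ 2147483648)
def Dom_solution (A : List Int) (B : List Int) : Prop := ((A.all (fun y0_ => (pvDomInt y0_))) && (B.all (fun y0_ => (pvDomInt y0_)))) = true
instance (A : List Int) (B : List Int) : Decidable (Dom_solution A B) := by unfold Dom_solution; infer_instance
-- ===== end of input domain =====

-- B replaces A's single stateful pass (seen-set + counter + branches) by a staged
-- pipeline: interleave, first-occurrence index dict, 0/1 repeat mask, prefix sum.

-- ===== PORT A =====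
-- index loop over range(len(A)); state (seen, prefixArr, count); prefixArr mutated in place
def solution (A : List Int) (B : List Int) : List Int :=
  (((PySem.List.pyRange 0 (A.length : Int) 1).foldl
    (fun (st : PySem.Set Int × List Int × Int) i =>
      let seen := st.1
      let prefixArr := st.2.1
      let count := st.2.2
      let count := if PySem.Set.contains seen (PySem.List.pyGetD A i 0) then count + 1 else count
      let seen := PySem.Set.add seen (PySem.List.pyGetD A i 0)
      let count := if PySem.Set.contains seen (PySem.List.pyGetD B i 0) then count + 1 else count
      let seen := PySem.Set.add seen (PySem.List.pyGetD B i 0)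
      let prefixArr := PySem.List.pySetD prefixArr i count
      (seen, prefixArr, count))
    (PySem.Set.empty, List.replicate A.length 0, 0)).2).1

-- ===== PORT B =====
-- staged: C = interleave(zip(A,B)); first = setdefault loop; dup = mask comprehension;
-- final loop: prefix-sum dup, appending after each odd index
def solution_alt (A : List Int) (B : List Int) : List Int :=
  let C := (A.zip B).flatMap (fun ab => [ab.1, ab.2])
  let first := (PySem.List.enumerate C 0).foldl
    (fun (d : PySem.Dict Int Int) p => d.setdefault p.2 p.1) PySem.Dict.empty
  let dup := (PySem.List.enumerate C 0).map
    (fun p => if first.getD p.2 0 = p.1 then (0 : Int) else 1)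
  (((PySem.List.enumerate dup 0).foldl
    (fun (st : List Int × Int) p =>
      let total := st.2 + p.2
      (if PySem.Int.mod p.1 2 = 1 then st.1 ++ [total] else st.1, total))
    ([], 0)).1)

-- ===== PRECONDITION & SPEC =====
-- A reads B[i] for every i < len(A): IndexError (excluded) when len(B) < len(A)
def Pre_solution (A : List Int) (B : List Int) : Prop := A.length ≤ B.length
instance (A : List Int) (B : List Int) : Decidable (Pre_solution A B) := by unfold Pre_solution; infer_instance
def pvWitness_solution : List Int × List Int := ([1, 3, 2], [2, 1, 3])

def Spec_solution (A : List Int) (B : List Int) (out : List Int) : Prop := out = solution_alt A B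
instance (A : List Int) (B : List Int) (out : List Int) : Decidable (Spec_solution A B out) := by unfold Spec_solution; infer_instance

-- ===== CLAIM (what is proved, stated in full; the proofs are below) =====
def Claim_equal_solution : Prop := ∀ (A : List Int) (B : List Int), Dom_solution A B → Pre_solution A B → Spec_solution A B (solution A B)

-- ===== LEMMAS AND PROOFS =====

-- the interleaved list C, the running seen-set of its first k elements, and the
-- number of distinct values among them
def itl (P : List (Int × Int)) : List Int := P.flatMap (fun ab => [ab.1, ab.2])
def seenS (C : List Int) (k : Nat) : PySem.Set Int :=
  (C.take k).foldl (fun s x => PySem.Set.add s x) PySem.Set.empty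
def distS (C : List Int) (k : Nat) : Int := PySem.Set.len (seenS C k)
-- the common reference output: entry i is 2(i+1) minus distinct among first 2i+2
def refC (C : List Int) (n : Nat) : List Int :=
  (List.range n).map (fun (i : Nat) => 2 * ((i : Int) + 1) - distS C (2 * i + 2))

-- A's loop body, named
def stepA (A B : List Int) (st : PySem.Set Int × List Int × Int) (i : Int) : PySem.Set Int × List Int × Int :=
  let seen := st.1
  let prefixArr := st.2.1
  let count := st.2.2
  let count := if PySem.Set.contains seen (PySem.List.pyGetD A i 0) then count + 1 else count
  let seen := PySem.Set.add seen (PySem.List.pyGetD A i 0)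
  let count := if PySem.Set.contains seen (PySem.List.pyGetD B i 0) then count + 1 else count
  let seen := PySem.Set.add seen (PySem.List.pyGetD B i 0)
  let prefixArr := PySem.List.pySetD prefixArr i count
  (seen, prefixArr, count)

-- B's stages, named
def firstD (A B : List Int) : PySem.Dict Int Int :=
  (PySem.List.enumerate (itl (A.zip B)) 0).foldl
    (fun (d : PySem.Dict Int Int) p => d.setdefault p.2 p.1) PySem.Dict.empty
def dupL (A B : List Int) : List Int :=
  (PySem.List.enumerate (itl (A.zip B)) 0).map
    (fun p => if (firstD A B).getD p.2 0 = p.1 then (0 : Int) else 1)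
def stepS (st : List Int × Int) (p : Int × Int) : List Int × Int :=
  let total := st.2 + p.2
  (if PySem.Int.mod p.1 2 = 1 then st.1 ++ [total] else st.1, total)

theorem solution_eq_stepA (A B : List Int) :
    solution A B = (((PySem.List.pyRange 0 (A.length : Int) 1).foldl (stepA A B)
      (PySem.Set.empty, List.replicate A.length 0, 0)).2).1 := rfl

theorem solution_alt_eq_stepS (A B : List Int) :
    solution_alt A B = ((PySem.List.enumerate (dupL A B) 0).foldl stepS ([], 0)).1 := rfl

theorem itl_append (P Q : List (Int × Int)) : itl (P ++ Q) = itl P ++ itl Q := by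
  simp [itl]

theorem itl_take (P : List (Int × Int)) (n : Nat) :
    (itl P).take (2 * n) = itl (P.take n) := by
  induction P generalizing n with
  | nil => simp [itl]
  | cons p t ih =>
      cases n with
      | zero => simp [itl]
      | succ m =>
          have h2 : 2 * (m + 1) = (2 * m) + 1 + 1 := by ring
          simp only [itl, List.flatMap_cons, List.cons_append, List.nil_append, h2,
            List.take_succ_cons]
          simpa [itl] using ih m

theorem length_itl (P : List (Int × Int)) : (itl P).length = 2 * P.length := by
  induction P with
  | nil => simp [itl]
  | cons p t ih => simp only [itl, List.flatMap_cons] at *; simp [ih]; omega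

theorem itl_take_step (P : List (Int × Int)) (n : Nat) (hn : n < P.length) :
    (itl P).take (2 * n + 2) = (itl P).take (2 * n) ++ [P[n].1, P[n].2] := by
  have h1 := List.take_succ_eq_append_getElem hn
  rw [show 2 * n + 2 = 2 * (n + 1) from by ring, itl_take, h1, itl_append, itl_take]
  simp [itl]

theorem mem_seenS (C : List Int) (k : Nat) (x : Int) :
    x ∈ seenS C k ↔ x ∈ C.take k := by
  unfold seenS
  simpa using PySem.Set.mem_foldl_add (C.take k) (fun b => b) PySem.Set.empty x

theorem len_add_set (s : PySem.Set Int) (x : Int) :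
    (PySem.Set.len (PySem.Set.add s x) : Int)
      = (PySem.Set.len s : Int) + (if PySem.Set.contains s x then 0 else 1) := by
  by_cases h : x ∈ s
  · simp [h]
  · rw [PySem.Set.add_of_not_mem h]
    simp [PySem.Set.len, h]

theorem seenS_step (C : List Int) (k : Nat) (hk : k < C.length) :
    seenS C (k + 1) = PySem.Set.add (seenS C k) (C[k]'hk) := by
  unfold seenS
  rw [List.take_succ_eq_append_getElem hk, List.foldl_append]
  simp

theorem distS_step (C : List Int) (k : Nat) (hk : k < C.length) :
    distS C (k + 1) = distS C k + (if C[k] ∈ C.take k then 0 else 1) := by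
  unfold distS
  rw [seenS_step C k hk, len_add_set]
  by_cases h : C[k] ∈ C.take k
  · have hm : C[k] ∈ seenS C k := (mem_seenS C k _).2 h
    simp [h, hm]
  · have hm : C[k] ∉ seenS C k := fun hc => h ((mem_seenS C k _).1 hc)
    simp [h, hm]

theorem count_step (seen : PySem.Set Int) (a b : Int) (m : Int) :
    (if PySem.Set.contains (PySem.Set.add seen a) b
       then (if PySem.Set.contains seen a then m + 1 else m) + 1
       else (if PySem.Set.contains seen a then m + 1 else m))
      = m + 2 - ((PySem.Set.len (PySem.Set.add (PySem.Set.add seen a) b) : Int)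
                  - (PySem.Set.len seen : Int)) := by
  rw [len_add_set, len_add_set]
  split_ifs <;> ring

theorem length_refC (C : List Int) (n : Nat) : (refC C n).length = n := by
  simp [refC]

theorem refC_succ (C : List Int) (n : Nat) :
    refC C (n + 1) = refC C n ++ [2 * ((n : Int) + 1) - distS C (2 * n + 2)] := by
  simp [refC, List.range_succ]

-- A-side loop invariant
theorem invariantA (A B : List Int) (h : A.length ≤ B.length) (n : Nat) (hn : n ≤ A.length) :
    (PySem.List.pyRange 0 (n : Int) 1).foldl (stepA A B)
        (PySem.Set.empty, List.replicate A.length 0, 0)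
      = (seenS (itl (A.zip B)) (2 * n),
         refC (itl (A.zip B)) n ++ List.replicate (A.length - n) 0,
         2 * (n : Int) - distS (itl (A.zip B)) (2 * n)) := by
  induction n with
  | zero =>
      simp [PySem.List.pyRange_one_eq_nil (le_refl (0 : Int)), seenS, distS, refC,
        PySem.Set.empty, PySem.Set.len]
  | succ n ih =>
      have hnA : n < A.length := by omega
      have hnB : n < B.length := by omega
      have hzip : n < (A.zip B).length := by simp; omega
      have hC2n1 : 2 * n + 1 < (itl (A.zip B)).length := by rw [length_itl]; simp; omega
      have hcast : ((n + 1 : Nat) : Int) = (n : Int) + 1 := by push_cast; ring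
      have hrange : PySem.List.pyRange 0 ((n : Int) + 1) 1
          = PySem.List.pyRange 0 (n : Int) 1 ++ [(n : Int)] :=
        PySem.List.pyRange_one_succ_right (by positivity)
      rw [hcast, hrange, List.foldl_append, ih (by omega)]
      simp only [List.foldl_cons, List.foldl_nil]
      have hgA : PySem.List.pyGetD A ((n : Int)) 0 = A[n] := by
        rw [PySem.List.pyGetD_natCast, List.getD_eq_getElem _ _ hnA]
      have hgB : PySem.List.pyGetD B ((n : Int)) 0 = B[n] := by
        rw [PySem.List.pyGetD_natCast, List.getD_eq_getElem _ _ hnB]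
      have hseen : seenS (itl (A.zip B)) (2 * (n + 1))
          = PySem.Set.add (PySem.Set.add (seenS (itl (A.zip B)) (2 * n)) A[n]) B[n] := by
        unfold seenS
        rw [show 2 * (n + 1) = 2 * n + 2 from by ring, itl_take_step (A.zip B) n hzip,
          List.foldl_append]
        simp [List.getElem_zip]
      simp only [stepA, hgA, hgB, PySem.List.pySetD_natCast]
      refine Prod.ext ?_ (Prod.ext ?_ ?_)
      · simpa using hseen.symm
      · show (refC (itl (A.zip B)) n ++ List.replicate (A.length - n) 0).set n
            (if PySem.Set.contains (PySem.Set.add (seenS (itl (A.zip B)) (2 * n)) A[n]) B[n]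
              then (if PySem.Set.contains (seenS (itl (A.zip B)) (2 * n)) A[n]
                      then 2 * (n : Int) - distS (itl (A.zip B)) (2 * n) + 1
                      else 2 * (n : Int) - distS (itl (A.zip B)) (2 * n)) + 1
              else (if PySem.Set.contains (seenS (itl (A.zip B)) (2 * n)) A[n]
                      then 2 * (n : Int) - distS (itl (A.zip B)) (2 * n) + 1
                      else 2 * (n : Int) - distS (itl (A.zip B)) (2 * n)))
          = refC (itl (A.zip B)) (n + 1) ++ List.replicate (A.length - (n + 1)) 0
        rw [count_step, List.set_append_right _ _ (by rw [length_refC]),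
          length_refC]
        rw [show A.length - n = (A.length - (n + 1)) + 1 from by omega,
          List.replicate_succ, Nat.sub_self, List.set_cons_zero, refC_succ]
        unfold distS
        rw [← hseen]
        rw [show 2 * (n + 1) = 2 * n + 2 from by ring]
        simp only [List.append_assoc, List.singleton_append]
        congr 2
        ring
      · show (if PySem.Set.contains (PySem.Set.add (seenS (itl (A.zip B)) (2 * n)) A[n]) B[n]
              then (if PySem.Set.contains (seenS (itl (A.zip B)) (2 * n)) A[n]
                      then 2 * (n : Int) - distS (itl (A.zip B)) (2 * n) + 1
                      else 2 * (n : Int) - distS (itl (A.zip B)) (2 * n)) + 1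
              else (if PySem.Set.contains (seenS (itl (A.zip B)) (2 * n)) A[n]
                      then 2 * (n : Int) - distS (itl (A.zip B)) (2 * n) + 1
                      else 2 * (n : Int) - distS (itl (A.zip B)) (2 * n)))
          = 2 * ((n : Int) + 1) - distS (itl (A.zip B)) (2 * (n + 1))
        rw [count_step]
        unfold distS
        rw [← hseen]
        ring

-- the setdefault loop builds the first-occurrence-index dict
theorem setdefault_fold_get? (xs : List Int) (s : Int) (d : PySem.Dict Int Int) (v : Int) :
    (((PySem.List.enumerate xs s).foldl
        (fun (d : PySem.Dict Int Int) p => d.setdefault p.2 p.1) d).get? v)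
      = match d.get? v with
        | some w => some w
        | none => (PySem.List.index? xs v).map (fun k => s + (k : Int)) := by
  induction xs generalizing s d with
  | nil =>
      cases hd : d.get? v <;> simp [PySem.List.enumerate_nil, hd, PySem.List.index?]
  | cons x t ih =>
      rw [PySem.List.enumerate_cons]
      simp only [List.foldl_cons]
      rw [ih]
      by_cases hvx : v = x
      · subst hvx
        rw [PySem.Dict.get?_setdefault_self]
        cases hd : d.get? v with
        | some w => simp [hd]
        | none =>
            rw [PySem.List.index?_cons_self]
            simp [hd]
      · rw [PySem.Dict.get?_setdefault_of_ne d s hvx]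
        rw [PySem.List.index?_cons_of_ne t (Ne.symm hvx)]
        cases hd : d.get? v with
        | some w => simp [hd]
        | none =>
            simp only [hd]
            cases hi : PySem.List.index? t v <;> simp [hi] <;> ring

-- the mask entry j is 1 iff C[j] repeats an earlier element
theorem dup_entry (A B : List Int) (j : Nat) (hj : j < (itl (A.zip B)).length) :
    (if (firstD A B).getD ((itl (A.zip B))[j]) 0 = (j : Int) then (0 : Int) else 1)
      = (if (itl (A.zip B))[j] ∈ (itl (A.zip B)).take j then 1 else 0) := by
  set C := itl (A.zip B) with hc
  have hmem : C[j] ∈ C := List.getElem_mem hj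
  have hsome : (PySem.List.index? C C[j]).isSome :=
    (PySem.List.index?_isSome_iff C C[j]).2 hmem
  obtain ⟨k0, hk0⟩ := Option.isSome_iff_exists.1 hsome
  obtain ⟨hk0len, hk0eq, hk0min⟩ := PySem.List.getElem_of_index?_eq_some hk0
  have hgd : (firstD A B).getD C[j] 0 = (k0 : Int) := by
    rw [PySem.Dict.getD_eq_get?_getD]
    unfold firstD
    rw [← hc, setdefault_fold_get? C 0 PySem.Dict.empty C[j]]
    have hk0' : List.idxOf? C[j] C = some k0 := by simpa using hk0
    simp [hk0']
  have hk0le : k0 ≤ j := by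
    by_contra hlt
    push_neg at hlt
    exact hk0min j (by omega) rfl
  rw [hgd]
  by_cases hmemt : C[j] ∈ C.take j
  · obtain ⟨i, hi, hieq⟩ := List.mem_take_iff_getElem.1 hmemt
    have hik0 : k0 ≤ i := by
      by_contra hik
      push_neg at hik
      exact hk0min i hik hieq
    have hk0j : k0 < j := by omega
    have hne : ((k0 : Int)) ≠ (j : Int) := by
      exact_mod_cast Nat.ne_of_lt hk0j
    rw [if_neg hne, if_pos hmemt]
  · have hk0j : k0 = j := by
      rcases Nat.lt_or_ge k0 j with hlt | hge
      · exfalso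
        apply hmemt
        exact List.mem_take_iff_getElem.2 ⟨k0, by omega, hk0eq⟩
      · omega
    rw [hk0j, if_pos rfl, if_neg hmemt]

theorem length_dupL (A B : List Int) : (dupL A B).length = (itl (A.zip B)).length := by
  simp [dupL]

theorem dupL_getElem (A B : List Int) (j : Nat) (hj : j < (itl (A.zip B)).length) :
    (dupL A B)[j]'(by rw [length_dupL]; exact hj)
      = (if (itl (A.zip B))[j] ∈ (itl (A.zip B)).take j then (1 : Int) else 0) := by
  rw [← dup_entry A B j hj]
  simp [dupL, PySem.List.getElem_enumerate]

-- B-side final-loop invariant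
theorem invariantB (C : List Int) (dup : List Int)
    (hlen : dup.length = C.length)
    (hdup : ∀ (j : Nat) (hj : j < C.length),
      dup[j]'(by omega) = (if C[j] ∈ C.take j then (1 : Int) else 0))
    (n : Nat) (hn : 2 * n ≤ C.length) :
    (PySem.List.enumerate (dup.take (2 * n)) 0).foldl stepS ([], 0)
      = (refC C n, 2 * (n : Int) - distS C (2 * n)) := by
  induction n with
  | zero => simp [refC, distS, seenS, PySem.List.enumerate_nil, PySem.Set.empty, PySem.Set.len]
  | succ n ih =>
      have h1 : 2 * n < dup.length := by omega
      have h2 : 2 * n + 1 < dup.length := by omega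
      have ha : dup.take (2 * (n + 1)) = dup.take (2 * n) ++ [dup[2 * n], dup[2 * n + 1]] := by
        rw [show 2 * (n + 1) = (2 * n + 1) + 1 from by ring,
          List.take_succ_eq_append_getElem h2,
          List.take_succ_eq_append_getElem h1, List.append_assoc]
        rfl
      have hlent : (dup.take (2 * n)).length = 2 * n := by
        rw [List.length_take]; omega
      rw [ha, PySem.List.enumerate_append, List.foldl_append, ih (by omega), hlent]
      simp only [PySem.List.enumerate_cons, PySem.List.enumerate_nil, List.foldl_cons,
        List.foldl_nil]
      have hmod0 : PySem.Int.mod (0 + ((2 * n : Nat) : Int)) 2 = 0 := by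
        rw [PySem.Int.mod_eq_emod_of_pos (by norm_num)]
        push_cast
        omega
      have hmod1 : PySem.Int.mod (0 + ((2 * n : Nat) : Int) + 1) 2 = 1 := by
        rw [PySem.Int.mod_eq_emod_of_pos (by norm_num)]
        push_cast
        omega
      have hd0 := hdup (2 * n) (by omega)
      have hd1 := hdup (2 * n + 1) (by omega)
      have hs1 := distS_step C (2 * n) (by omega)
      have hs2 := distS_step C (2 * n + 1) (by omega)
      simp only [stepS, hmod0, hmod1]
      rw [if_neg (show ¬ ((0 : Int) = 1) from by norm_num)]
      have hkey : (2 * (n : Int) - distS C (2 * n)) + dup[2 * n] + dup[2 * n + 1]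
          = 2 * (((n : Nat) : Int) + 1) - distS C (2 * n + 2) := by
        rw [hd0, hd1, show 2 * n + 2 = (2 * n + 1) + 1 from by omega, hs2, hs1]
        split_ifs <;> ring
      refine Prod.ext ?_ ?_
      · show refC C n ++ [2 * (n : Int) - distS C (2 * n) + dup[2 * n] + dup[2 * n + 1]]
          = refC C (n + 1)
        rw [refC_succ, hkey]
      · show 2 * (n : Int) - distS C (2 * n) + dup[2 * n] + dup[2 * n + 1]
          = 2 * ((n + 1 : Nat) : Int) - distS C (2 * (n + 1))
        rw [hkey, show 2 * (n + 1) = 2 * n + 2 from by ring]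
        push_cast
        ring

-- ===== VERDICT (by name: the statement is the Claim_ definition above) =====
theorem solution_spec : Claim_equal_solution := by
  intro A B _ hpre
  unfold Spec_solution
  have hpre' : A.length ≤ B.length := hpre
  have hzlen : (A.zip B).length = A.length := by simp; omega
  have hClen : (itl (A.zip B)).length = 2 * A.length := by rw [length_itl, hzlen]
  -- A's side
  rw [solution_eq_stepA, invariantA A B hpre' A.length le_rfl]
  simp only [Nat.sub_self, List.replicate_zero, List.append_nil]
  -- B's side
  rw [solution_alt_eq_stepS]
  have hfull : (dupL A B).take (2 * A.length) = dupL A B := by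
    apply List.take_of_length_le
    rw [length_dupL, hClen]
  have hinv := invariantB (itl (A.zip B)) (dupL A B)
    (length_dupL A B)
    (fun j hj => dupL_getElem A B j hj)
    A.length (by omega)
  rw [hfull] at hinv
  rw [hinv]
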